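-- pv_equiv track=rewrite | github.com/pokemonlover1234/StevensHomework | CS383/code/stairs/stairclimber.py | get_ways_1
-- ===== SOURCE A (Python) =====
-- def get_ways_1(num_stairs):
--     ways = []
--     if num_stairs <= 0:
--         ways.append([])
--     else:
--         for i in range(1, 4):
--             if num_stairs >= i:
--                 result = get_ways_1(num_stairs - i)
--                 for j in range(len(result)):
--                     result[j].insert(0, i)
--                 ways += result
--     return ways
-- ===== SOURCE B (Python) =====
-- def get_ways_1(num_stairs):
--     if num_stairs <= 0:
--         return [[]]
--     ways = [[[]]]
--     for s in range(1, num_stairs + 1):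
--         ways.append([[i] + comp for i in range(1, 4) if s >= i for comp in ways[s - i]])
--     return ways[num_stairs]
-- ===== Notes on version B (the rewrite author's own statement) =====
-- stated objective: faster
-- what changed: Replaced the exponential-time recursion (which recomputes subproblems and mutates sublists with insert(0,i)) by an iterative bottom-up DP table ways[0..n], each row built once from the three previous rows with fresh [i]+comp lists.
import Mathlib
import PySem

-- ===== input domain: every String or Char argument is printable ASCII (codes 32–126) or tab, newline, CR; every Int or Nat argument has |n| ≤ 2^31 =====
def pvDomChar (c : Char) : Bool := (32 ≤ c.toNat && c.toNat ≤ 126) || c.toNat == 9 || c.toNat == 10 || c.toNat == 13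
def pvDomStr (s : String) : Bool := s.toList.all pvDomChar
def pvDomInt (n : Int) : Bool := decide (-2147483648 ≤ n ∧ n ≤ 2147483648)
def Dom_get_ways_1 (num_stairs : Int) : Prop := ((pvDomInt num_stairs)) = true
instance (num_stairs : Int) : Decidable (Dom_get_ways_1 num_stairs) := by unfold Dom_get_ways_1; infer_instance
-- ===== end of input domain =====

-- B replaces A's exponential recursion by an iterative bottom-up DP table (objective: faster, asymptotically).

-- ===== PORT A =====
-- Literal port of A's recursion; the fixed loop 'for i in range(1, 4)' is unrolled into its
-- three iterations i = 1, 2, 3 in order (each guarded by 'num_stairs >= i'), and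
-- 'result[j].insert(0, i)' on every sublist is the map prepending i.
def get_ways_1 (num_stairs : Int) : List (List Int) :=
  if num_stairs ≤ 0 then [[]]
  else
    (if num_stairs ≥ 1 then (get_ways_1 (num_stairs - 1)).map (fun r => 1 :: r) else []) ++
    (if num_stairs ≥ 2 then (get_ways_1 (num_stairs - 2)).map (fun r => 2 :: r) else []) ++
    (if num_stairs ≥ 3 then (get_ways_1 (num_stairs - 3)).map (fun r => 3 :: r) else [])
termination_by num_stairs.toNat
decreasing_by all_goals omega

-- ===== PORT B =====
-- Row s of the DP table: the comprehension [[i] + comp for i in range(1, 4) if s >= i for comp in ways[s - i]];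
-- Source B's index ways[s - i] is nonnegative and in range under the guard s >= i, so getD is exact.
def pvRow (tbl : List (List (List Int))) (s : Nat) : List (List Int) :=
  [1, 2, 3].flatMap (fun i => if s ≥ i then (tbl.getD (s - i) []).map (fun comp => (i : Int) :: comp) else [])

-- 'for s in range(1, num_stairs + 1)' rendered as a fold over List.range with s = s0 + 1.
def get_ways_1_alt (num_stairs : Int) : List (List Int) :=
  if num_stairs ≤ 0 then [[]]
  else
    ((List.range num_stairs.toNat).foldl (fun tbl s0 => tbl ++ [pvRow tbl (s0 + 1)]) [[[]]]).getD
      num_stairs.toNat []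

-- ===== PRECONDITION & SPEC =====
-- A recurses to depth num_stairs, so on very large num_stairs CPython raises RecursionError
-- before returning; Pre_ excludes those inputs (a bound safely below the interpreter's
-- recursion limit) and nothing on which A returns.
def Pre_get_ways_1 (num_stairs : Int) : Prop := num_stairs ≤ 9000
instance (num_stairs : Int) : Decidable (Pre_get_ways_1 num_stairs) := by unfold Pre_get_ways_1; infer_instance
def pvWitness_get_ways_1 : Int := (5)

def Spec_get_ways_1 (num_stairs : Int) (out : List (List Int)) : Prop := out = get_ways_1_alt num_stairs
instance (num_stairs : Int) (out : List (List Int)) : Decidable (Spec_get_ways_1 num_stairs out) := by unfold Spec_get_ways_1; infer_instance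

-- ===== CLAIM (what is proved, stated in full; the proofs are below) =====
def Claim_equal_get_ways_1 : Prop := ∀ (num_stairs : Int), Dom_get_ways_1 num_stairs → Pre_get_ways_1 num_stairs → Spec_get_ways_1 num_stairs (get_ways_1 num_stairs)

-- ===== LEMMAS AND PROOFS =====

theorem pv_base : get_ways_1 0 = [[]] := by
  rw [get_ways_1]; norm_num

theorem pvTable_get (m j : Nat) (hj : j ≤ m) :
    ((List.range (m + 1)).map (fun k : Nat => get_ways_1 (k : Int))).getD j [] = get_ways_1 (j : Int) := by
  rw [List.getD_eq_getElem?_getD, List.getElem?_map, List.getElem?_range (by omega)]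
  rfl

-- The loop invariant: after processing s0 = 0 .. m-1, the table is get_ways_1 on 0 .. m.
theorem pvTable_inv (m : Nat) :
    (List.range m).foldl (fun tbl s0 => tbl ++ [pvRow tbl (s0 + 1)]) [[[]]]
      = (List.range (m + 1)).map (fun k : Nat => get_ways_1 (k : Int)) := by
  induction m with
  | zero => simp [pv_base]
  | succ m ih =>
    rw [List.range_succ, List.foldl_append, List.foldl_cons, List.foldl_nil, ih]
    have hget : ∀ j : Nat, j ≤ m →
        ((List.range (m + 1)).map (fun k : Nat => get_ways_1 (k : Int))).getD j [] = get_ways_1 (j : Int) :=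
      fun j hj => pvTable_get (m) j hj
    have hrow : pvRow ((List.range (m + 1)).map (fun k : Nat => get_ways_1 (k : Int))) (m + 1)
        = get_ways_1 ((m + 1 : Nat) : Int) := by
      unfold pvRow
      rw [show get_ways_1 ((m + 1 : Nat) : Int) = _ from by rw [get_ways_1]]
      simp only [List.flatMap_cons, List.flatMap_nil, List.append_nil]
      have h0 : ¬ ((m + 1 : Nat) : Int) ≤ 0 := by push_cast; omega
      have h1 : ((m + 1 : Nat) : Int) ≥ 1 := by push_cast; omega
      rw [if_neg h0, if_pos h1, if_pos (by omega : m + 1 ≥ 1), hget (m + 1 - 1) (by omega)]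
      have e1 : ((m + 1 : Nat) : Int) - 1 = ((m + 1 - 1 : Nat) : Int) := by push_cast; omega
      rw [e1]
      by_cases h2 : m + 1 ≥ 2
      · rw [if_pos h2, if_pos (by push_cast; omega : ((m + 1 : Nat) : Int) ≥ 2),
            hget (m + 1 - 2) (by omega),
            show ((m + 1 : Nat) : Int) - 2 = ((m + 1 - 2 : Nat) : Int) by push_cast; omega]
        by_cases h3 : m + 1 ≥ 3
        · rw [if_pos h3, if_pos (by push_cast; omega : ((m + 1 : Nat) : Int) ≥ 3),
              hget (m + 1 - 3) (by omega),
              show ((m + 1 : Nat) : Int) - 3 = ((m + 1 - 3 : Nat) : Int) by push_cast; omega]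
          simp
        · rw [if_neg h3, if_neg (by push_cast; omega : ¬ ((m + 1 : Nat) : Int) ≥ 3)]
          simp
      · rw [if_neg h2, if_neg (by push_cast; omega : ¬ ((m + 1 : Nat) : Int) ≥ 2),
            if_neg (by omega : ¬ m + 1 ≥ 3),
            if_neg (by push_cast; omega : ¬ ((m + 1 : Nat) : Int) ≥ 3)]
        simp
    rw [hrow]
    conv_rhs => rw [List.range_succ, List.map_append]
    simp

-- ===== VERDICT (by name: the statement is the Claim_ definition above) =====
theorem get_ways_1_spec : Claim_equal_get_ways_1 := by
  intro n _ _
  unfold Spec_get_ways_1 get_ways_1_alt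
  by_cases h : n ≤ 0
  · rw [if_pos h, get_ways_1, if_pos h]
  · rw [if_neg h, pvTable_inv, pvTable_get n.toNat n.toNat (le_refl _),
        Int.toNat_of_nonneg (by omega)]
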